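-- pv_equiv track=rewrite | github.com/ioannisCC/miroir-hackathon | backend/prompts/profile_extraction.py | clean_body
-- ===== SOURCE A (Python) =====
-- def clean_body(body: str) -> str:
--     """
--     Strip noise before sending to Claude:
--     - Quoted reply chains (lines starting with >)
--     - Forwarded message headers
--     - Signature blocks
--     No arbitrary character truncation — keep full actual content.
--     """
--     lines = body.splitlines()
--     cleaned = []
--     for line in lines:
--         stripped = line.strip()
--         # Drop quoted reply lines
--         if stripped.startswith(">"):
--             continue
--         # Stop at forwarded message headers
--         if stripped.startswith("-----Original Message") or stripped.startswith("-----Forwarded"):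
--             break
--         # Stop at signature blocks
--         if stripped in ("--", "___", "****"):
--             break
--         cleaned.append(line)
--     return "\n".join(cleaned).strip()
-- ===== SOURCE B (Python) =====
-- def clean_body(body: str) -> str:
--     lines = body.splitlines()
--
--     def is_stop(line):
--         s = line.strip()
--         return (s.startswith("-----Original Message")
--                 or s.startswith("-----Forwarded")
--                 or s in ("--", "___", "****"))
--
--     cutoff = next((i for i, ln in enumerate(lines) if is_stop(ln)), len(lines))
--     kept = [ln for ln in lines[:cutoff] if not ln.strip().startswith(">")]
--     return "\n".join(kept).strip()
-- ===== Notes on version B (the rewrite author's own statement) =====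
-- stated objective: alternative
-- what changed: Replaces the fused continue/break/append loop by two separate passes: first find the cutoff index of the first stop-marker line, then filter quoted lines out of the head slice lines[:cutoff].
import Mathlib
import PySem

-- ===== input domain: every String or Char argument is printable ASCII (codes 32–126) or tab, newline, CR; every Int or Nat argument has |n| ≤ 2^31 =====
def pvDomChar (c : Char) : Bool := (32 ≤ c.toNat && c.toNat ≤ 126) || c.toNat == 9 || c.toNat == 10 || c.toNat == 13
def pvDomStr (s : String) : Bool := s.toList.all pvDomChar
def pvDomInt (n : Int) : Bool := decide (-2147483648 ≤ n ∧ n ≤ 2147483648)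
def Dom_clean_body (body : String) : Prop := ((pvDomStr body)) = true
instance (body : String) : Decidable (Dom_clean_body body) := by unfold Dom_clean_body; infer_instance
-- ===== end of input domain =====

-- B separates cutoff detection from quoted-line filtering (two passes) instead of A's fused continue/break/append loop; same O(n) cost.

-- ===== PORT A =====
-- A's for-loop with continue/break, as structural recursion over the lines.
def cleanLoopA : List String → List String
  | [] => []
  | l :: rest =>
    let s := PySem.Str.strip l
    if PySem.Str.startswith s ">" then cleanLoopA rest
    else if PySem.Str.startswith s "-----Original Message" || PySem.Str.startswith s "-----Forwarded" then []
    else if s == "--" || s == "___" || s == "****" then []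
    else l :: cleanLoopA rest

def clean_body (body : String) : String :=
  PySem.Str.strip (PySem.Str.join "\n" (cleanLoopA (PySem.Str.splitlines body)))

-- ===== PORT B =====
def isStop (l : String) : Bool :=
  let s := PySem.Str.strip l
  PySem.Str.startswith s "-----Original Message" || PySem.Str.startswith s "-----Forwarded"
    || s == "--" || s == "___" || s == "****"

def clean_body_alt (body : String) : String :=
  let lines := PySem.Str.splitlines body
  let cutoff := lines.findIdx isStop
  let kept := (lines.take cutoff).filter (fun l => !PySem.Str.startswith (PySem.Str.strip l) ">")
  PySem.Str.strip (PySem.Str.join "\n" kept)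

-- ===== PRECONDITION & SPEC =====
def Spec_clean_body (body : String) (out : String) : Prop := out = clean_body_alt body
instance (body : String) (out : String) : Decidable (Spec_clean_body body out) := by unfold Spec_clean_body; infer_instance

-- ===== CLAIM (what is proved, stated in full; the proofs are below) =====
def Claim_equal_clean_body : Prop := ∀ (body : String), Dom_clean_body body → Spec_clean_body body (clean_body body)

-- ===== LEMMAS AND PROOFS =====

-- a quoted line (stripped form starts with ">") is never a stop marker
lemma quoted_not_stop (l : String)
    (h : PySem.Str.startswith (PySem.Str.strip l) ">" = true) : isStop l = false := by
  unfold isStop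
  rw [PySem.Str.startswith_eq, PySem.Chars.startswith_iff] at h
  obtain ⟨t, ht⟩ := h
  have hl : (PySem.Str.strip l).toList = '>' :: t := by simpa using ht.symm
  have h1 : PySem.Str.strip l ≠ "--" := by
    intro he; rw [he] at hl; simp at hl
  have h2 : PySem.Str.strip l ≠ "___" := by
    intro he; rw [he] at hl; simp at hl
  have h3 : PySem.Str.strip l ≠ "****" := by
    intro he; rw [he] at hl; simp at hl
  simp [hl, PySem.Chars.startswith, List.isPrefixOf, h1, h2, h3]

lemma loop_eq (lines : List String) :
    cleanLoopA lines =
      (lines.take (lines.findIdx isStop)).filter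
        (fun l => !PySem.Str.startswith (PySem.Str.strip l) ">") := by
  induction lines with
  | nil => simp [cleanLoopA]
  | cons l rest ih =>
    rw [List.findIdx_cons]
    by_cases hq : PySem.Str.startswith (PySem.Str.strip l) ">" = true
    · rw [quoted_not_stop l hq]
      show cleanLoopA (l :: rest) = _
      unfold cleanLoopA
      rw [if_pos hq, ih]
      simp only [cond_false, List.take_succ_cons, List.filter_cons, hq, Bool.not_true,
        Bool.false_eq_true, if_false]
    · by_cases hs : isStop l = true
      · rw [hs]
        show cleanLoopA (l :: rest) = _
        unfold cleanLoopA
        rw [if_neg hq]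
        simp only [cond_true, List.take_zero, List.filter_nil]
        unfold isStop at hs
        simp only [Bool.or_eq_true] at hs
        split_ifs with h1 h2
        · rfl
        · rfl
        · exfalso
          rcases hs with ((((a|a)|a)|a)|a) <;> simp_all
      · rw [Bool.not_eq_true] at hs
        rw [hs]
        show cleanLoopA (l :: rest) = _
        unfold cleanLoopA
        rw [if_neg hq]
        unfold isStop at hs
        simp only [Bool.or_eq_false_iff] at hs
        obtain ⟨⟨⟨⟨h1, h2⟩, h3⟩, h4⟩, h5⟩ := hs
        rw [if_neg (by simp only [h1, h2]; simp), if_neg (by simp only [h3, h4, h5]; simp), ih]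
        simp only [cond_false, List.take_succ_cons, List.filter_cons]
        rw [Bool.not_eq_true] at hq
        simp only [hq, Bool.not_false, if_true]

-- ===== VERDICT (by name: the statement is the Claim_ definition above) =====
theorem clean_body_spec : Claim_equal_clean_body := by
  intro body _
  unfold Spec_clean_body clean_body clean_body_alt
  rw [loop_eq]
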